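-- pv_equiv track=rewrite | github.com/EngindalgaMaku/rageducation_backend | src/query_processing/query_processor.py | _assess_formality
-- ===== SOURCE A (Python) =====
-- def _assess_formality(query: str) -> str:
--     """Assess the formality level of the query."""
--     formal_indicators = ['lütfen', 'rica etsem', 'mümkün mü', 'please', 'could you']
--     informal_indicators = ['nasıl', 'ne', 'hey', 'what', 'how']
--
--     query_lower = query.lower()
--     formal_count = sum(1 for indicator in formal_indicators if indicator in query_lower)
--     informal_count = sum(1 for indicator in informal_indicators if indicator in query_lower)
--
--     if formal_count > informal_count:
--         return "formal"
--     elif informal_count > formal_count: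
--         return "informal"
--     else:
--         return "neutral"
-- ===== SOURCE B (Python) =====
-- def _assess_formality(query: str) -> str:
--     """Assess formality by a single position sweep over the query,
--     collecting the set of indicators that start at some position."""
--     formal_indicators = ['lütfen', 'rica etsem', 'mümkün mü', 'please', 'could you']
--     informal_indicators = ['nasıl', 'ne', 'hey', 'what', 'how']
--     q = query.lower()
--     found = set()
--     for i in range(len(q)):
--         for ind in formal_indicators + informal_indicators:
--             if q.startswith(ind, i):
--                 found.add(ind)
--     f = len([x for x in formal_indicators if x in found])
--     g = len([x for x in informal_indicators if x in found])
--     if f > g: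
--         return "formal"
--     if g > f:
--         return "informal"
--     return "neutral"
-- ===== Notes on version B (the rewrite author's own statement) =====
-- stated objective: alternative
-- what changed: Replaces A's per-indicator builtin substring searches with a single left-to-right sweep over the query that at each position prefix-tests all indicators and accumulates the set of indicators found, then classifies from that set.
import Mathlib
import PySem

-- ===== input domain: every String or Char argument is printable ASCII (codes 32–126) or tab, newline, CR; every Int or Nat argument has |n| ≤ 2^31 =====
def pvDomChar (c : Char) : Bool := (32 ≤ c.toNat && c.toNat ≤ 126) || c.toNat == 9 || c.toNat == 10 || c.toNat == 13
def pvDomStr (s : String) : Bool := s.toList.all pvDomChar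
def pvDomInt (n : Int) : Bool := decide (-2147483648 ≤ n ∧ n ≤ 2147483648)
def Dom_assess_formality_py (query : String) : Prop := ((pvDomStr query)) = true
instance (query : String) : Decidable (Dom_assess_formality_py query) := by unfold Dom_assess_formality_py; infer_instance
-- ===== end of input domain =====

-- B replaces A's per-indicator builtin substring searches by a single left-to-right position
-- sweep over the query collecting the set of indicators that start somewhere (objective: alternative).

-- ===== PORT A =====
def assess_formality_py (query : String) : String :=
  let formal_indicators : List String := ["lütfen", "rica etsem", "mümkün mü", "please", "could you"]
  let informal_indicators : List String := ["nasıl", "ne", "hey", "what", "how"]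
  let query_lower := PySem.Str.lower query
  let formal_count : Int :=
    formal_indicators.foldl (fun acc ind => if PySem.Str.isIn ind query_lower then acc + 1 else acc) 0
  let informal_count : Int :=
    informal_indicators.foldl (fun acc ind => if PySem.Str.isIn ind query_lower then acc + 1 else acc) 0
  if formal_count > informal_count then "formal"
  else if informal_count > formal_count then "informal"
  else "neutral"

-- ===== PORT B =====
def assess_formality_py_alt (query : String) : String :=
  let formal_indicators : List String := ["lütfen", "rica etsem", "mümkün mü", "please", "could you"]
  let informal_indicators : List String := ["nasıl", "ne", "hey", "what", "how"]
  let q := PySem.Str.lower query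
  let found : PySem.Set String :=
    (PySem.List.pyRange 0 (PySem.Str.len q) 1).foldl
      (fun found i =>
        (formal_indicators ++ informal_indicators).foldl
          (fun found ind =>
            -- q.startswith(ind, i) for 0 ≤ i: exact — prefix test of ind at offset i
            if PySem.Chars.startswith (q.toList.drop i.toNat) ind.toList then found.add ind
            else found)
          found)
      PySem.Set.empty
  let f : Int := (formal_indicators.filter (fun x => PySem.Set.contains found x)).length
  let g : Int := (informal_indicators.filter (fun x => PySem.Set.contains found x)).length
  if f > g then "formal"
  else if g > f then "informal"
  else "neutral"

-- ===== PRECONDITION & SPEC =====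
def Spec_assess_formality_py (query : String) (out : String) : Prop := out = assess_formality_py_alt query
instance (query : String) (out : String) : Decidable (Spec_assess_formality_py query out) := by unfold Spec_assess_formality_py; infer_instance

-- ===== CLAIM (what is proved, stated in full; the proofs are below) =====
def Claim_equal_assess_formality_py : Prop := ∀ (query : String), Dom_assess_formality_py query → Spec_assess_formality_py query (assess_formality_py query)

-- ===== LEMMAS AND PROOFS =====

-- Membership in the set built by B's inner loop (one sweep position i over all indicators).
theorem pv_mem_inner (inds : List String) (p : String → Bool) (s : PySem.Set String) (x : String) :
    x ∈ inds.foldl (fun s ind => if p ind then PySem.Set.add s ind else s) s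
      ↔ x ∈ s ∨ (x ∈ inds ∧ p x = true) := by
  induction inds generalizing s with
  | nil => simp
  | cons a t ih =>
    simp only [List.foldl_cons, ih]
    by_cases hp : p a
    · simp only [hp, if_pos, PySem.Set.mem_add]
      constructor
      · rintro (⟨h | rfl⟩ | ⟨hm, hx⟩)
        · exact Or.inl h
        · exact Or.inr ⟨List.mem_cons_self, hp⟩
        · exact Or.inr ⟨List.mem_cons_of_mem _ hm, hx⟩
      · rintro (h | ⟨hm, hx⟩)
        · exact Or.inl (Or.inl h)
        · rcases List.mem_cons.mp hm with rfl | hm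
          · exact Or.inl (Or.inr rfl)
          · exact Or.inr ⟨hm, hx⟩
    · simp only [hp, if_neg, Bool.false_eq_true, not_false_iff]
      constructor
      · rintro (h | ⟨hm, hx⟩)
        · exact Or.inl h
        · exact Or.inr ⟨List.mem_cons_of_mem _ hm, hx⟩
      · rintro (h | ⟨hm, hx⟩)
        · exact Or.inl h
        · rcases List.mem_cons.mp hm with rfl | hm
          · exact absurd hx (by simp [hp])
          · exact Or.inr ⟨hm, hx⟩

-- Membership in the set built by B's full double loop.
theorem pv_mem_outer (range : List Int) (inds : List String) (p : String → Int → Bool)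
    (s : PySem.Set String) (x : String) :
    x ∈ range.foldl
        (fun s i => inds.foldl (fun s ind => if p ind i then PySem.Set.add s ind else s) s) s
      ↔ x ∈ s ∨ ∃ i ∈ range, x ∈ inds ∧ p x i = true := by
  induction range generalizing s with
  | nil => simp
  | cons a t ih =>
    simp only [List.foldl_cons, ih, pv_mem_inner]
    constructor
    · rintro (⟨h | ⟨hm, hx⟩⟩ | ⟨i, hi, hm, hx⟩)
      · exact Or.inl h
      · exact Or.inr ⟨a, List.mem_cons_self, hm, hx⟩
      · exact Or.inr ⟨i, List.mem_cons_of_mem _ hi, hm, hx⟩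
    · rintro (h | ⟨i, hi, hm, hx⟩)
      · exact Or.inl (Or.inl h)
      · rcases List.mem_cons.mp hi with rfl | hi
        · exact Or.inl (Or.inr ⟨hm, hx⟩)
        · exact Or.inr ⟨i, hi, hm, hx⟩

-- The position sweep finds a nonempty pattern iff Python's 'sub in s' does.
theorem pv_sweep_iff_isIn (L : List Char) (sub : List Char) (hsub : sub ≠ []) :
    (∃ i ∈ PySem.List.pyRange 0 (L.length : Int) 1,
        PySem.Chars.startswith (L.drop i.toNat) sub = true)
      ↔ PySem.Chars.isIn sub L = true := by
  rw [← PySem.Chars.exists_prefix_drop_iff_isIn]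
  constructor
  · rintro ⟨i, _, hi⟩
    exact ⟨i.toNat, (PySem.Chars.startswith_iff _ _).mp hi⟩
  · rintro ⟨j, hj⟩
    by_cases hlt : j < L.length
    · refine ⟨(j : Int), ?_, ?_⟩
      · rw [PySem.List.mem_pyRange_one]
        constructor <;> [exact Int.natCast_nonneg j; exact_mod_cast hlt]
      · rw [PySem.Chars.startswith_iff]
        simpa using hj
    · exfalso
      have : L.drop j = [] := List.drop_eq_nil_of_le (Nat.le_of_not_lt hlt)
      rw [this, List.prefix_nil] at hj
      exact hsub hj

-- For each of the ten (nonempty) indicators, membership in B's found set equals A's isIn test.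
theorem pv_found_iff (query : String) (x : String) (hx : x ∈
      (["lütfen", "rica etsem", "mümkün mü", "please", "could you"] ++
       ["nasıl", "ne", "hey", "what", "how"] : List String)) :
    (x ∈ (PySem.List.pyRange 0 (PySem.Str.len (PySem.Str.lower query)) 1).foldl
        (fun found i =>
          ((["lütfen", "rica etsem", "mümkün mü", "please", "could you"] ++
            ["nasıl", "ne", "hey", "what", "how"] : List String)).foldl
            (fun found ind =>
              if PySem.Chars.startswith ((PySem.Str.lower query).toList.drop i.toNat) ind.toList
              then PySem.Set.add found ind else found)
            found)
        PySem.Set.empty)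
      ↔ PySem.Str.isIn x (PySem.Str.lower query) = true := by
  rw [pv_mem_outer]
  have hne : x.toList ≠ [] := by
    fin_cases hx <;> decide
  have hlen : PySem.Str.len (PySem.Str.lower query) = ((PySem.Str.lower query).toList.length : Int) := by
    simp [PySem.Str.len]
  rw [hlen]
  constructor
  · rintro (h | ⟨i, hi, _, hx'⟩)
    · exact absurd h (by simp [PySem.Set.empty])
    · have := (pv_sweep_iff_isIn (PySem.Str.lower query).toList x.toList hne).mp ⟨i, hi, hx'⟩
      simpa [PySem.Str.isIn] using this
  · intro h
    have h' : PySem.Chars.isIn x.toList (PySem.Str.lower query).toList = true := by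
      simpa [PySem.Str.isIn] using h
    obtain ⟨i, hi, hsw⟩ := (pv_sweep_iff_isIn (PySem.Str.lower query).toList x.toList hne).mpr h'
    exact Or.inr ⟨i, hi, hx, hsw⟩

theorem pv_count_eq (inds : List String) (p : String → Bool) :
    inds.foldl (fun acc ind => if p ind then acc + 1 else acc) (0 : Int)
      = ((inds.filter p).length : Int) := by
  rw [PySem.List.foldl_if_add_one]
  simp [List.countP_eq_length_filter]

-- Filtering by membership in B's found set equals filtering by A's isIn test.
theorem pv_filter_eq (query : String) (inds : List String) (hsub : ∀ x ∈ inds, x ∈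
      (["lütfen", "rica etsem", "mümkün mü", "please", "could you"] ++
       ["nasıl", "ne", "hey", "what", "how"] : List String)) :
    (inds.filter (fun x => PySem.Set.contains
        ((PySem.List.pyRange 0 (PySem.Str.len (PySem.Str.lower query)) 1).foldl
          (fun found i =>
            ((["lütfen", "rica etsem", "mümkün mü", "please", "could you"] ++
              ["nasıl", "ne", "hey", "what", "how"] : List String)).foldl
              (fun found ind =>
                if PySem.Chars.startswith ((PySem.Str.lower query).toList.drop i.toNat) ind.toList
                then PySem.Set.add found ind else found)
              found)
          PySem.Set.empty) x))
      = inds.filter (fun x => PySem.Str.isIn x (PySem.Str.lower query)) := by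
  apply List.filter_congr
  intro x hx
  have h := pv_found_iff query x (hsub x hx)
  rw [Bool.eq_iff_iff]
  constructor
  · intro hc
    exact h.mp (by simpa [PySem.Set.contains] using hc)
  · intro hi
    simpa [PySem.Set.contains] using h.mpr hi

theorem assess_formality_py_eq_alt (query : String) :
    assess_formality_py query = assess_formality_py_alt query := by
  have h1 := pv_filter_eq query ["lütfen", "rica etsem", "mümkün mü", "please", "could you"]
    (by decide)
  have h2 := pv_filter_eq query ["nasıl", "ne", "hey", "what", "how"] (by decide)
  simp only [assess_formality_py, assess_formality_py_alt, pv_count_eq, h1, h2]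

-- ===== VERDICT (by name: the statement is the Claim_ definition above) =====
theorem assess_formality_py_spec : Claim_equal_assess_formality_py := by
  intro query _
  exact assess_formality_py_eq_alt query
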